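-- pv_equiv track=rewrite | github.com/hjs0522/Algorithm | 조이스틱.py | solution
-- ===== SOURCE A (Python) =====
-- def solution(name):
--     answer = 0
--     idx = 0
--     new_name = [min(ord(i)-ord('A'), ord('Z')-ord(i)+1)for i in name]
--     while(True):
--         answer += new_name[idx]
--         new_name[idx] = 0
--         if(sum(new_name) == 0):
--             break
--         left, right = 1, 1
--         while new_name[idx - left] == 0:
--             left += 1
--         while new_name[idx + right] == 0:
--             right += 1
--         answer += left if left < right else right
--         idx += -left if left < right else right
--     return answer
-- ===== SOURCE B (Python) =====
-- def solution(name):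
--     n = len(name)
--     costs = [min(ord(c) - ord('A'), ord('Z') - ord(c) + 1) for c in name]
--     live = [p for p in range(n) if costs[p] != 0]
--     answer = costs[0] if n else 0
--     total = sum(costs) - answer
--     if live and live[0] == 0:
--         live = live[1:]
--     i, j = 0, len(live) - 1
--     pos = 0
--     while total != 0:
--         ld = (pos - live[j]) % n
--         rd = (live[i] - pos) % n
--         if ld < rd:
--             pos = live[j]
--             j -= 1
--             answer += ld
--         else:
--             pos = live[i]
--             i += 1
--             answer += rd
--         answer += costs[pos]
--         total -= costs[pos]
--     return answer
-- ===== Notes on version B (the rewrite author's own statement) =====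
-- stated objective: faster
-- what changed: A rescans the array for the nearest nonzero neighbour and recomputes sum(new_name) on every step (O(n) per step); B precomputes the sorted list of nonzero positions once and consumes it from both ends with two pointers while maintaining a running total, using the invariant that the nearest live positions left/right of the cursor are always the extremes of the remaining live band.
-- crash fix: A raises IndexError on the empty string (new_name[0] on an empty list); B returns 0 there. — e.g. on solution(""): A raises IndexError, B returns 0
import Mathlib
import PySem

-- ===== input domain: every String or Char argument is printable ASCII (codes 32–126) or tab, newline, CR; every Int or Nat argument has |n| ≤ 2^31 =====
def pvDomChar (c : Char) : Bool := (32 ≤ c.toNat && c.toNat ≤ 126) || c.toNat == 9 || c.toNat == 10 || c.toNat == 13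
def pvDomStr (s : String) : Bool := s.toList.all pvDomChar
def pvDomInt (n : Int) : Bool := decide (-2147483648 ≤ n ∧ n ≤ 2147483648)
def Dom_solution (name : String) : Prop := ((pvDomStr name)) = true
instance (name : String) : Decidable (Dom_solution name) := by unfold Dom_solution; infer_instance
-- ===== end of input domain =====

-- B replaces A's per-step nearest-nonzero scans and sum() recomputation by a one-pass
-- two-pointer consumption of the precomputed list of nonzero positions (O(n) vs O(n^2)).

-- ===== PORT A =====
-- min(ord(i)-ord('A'), ord('Z')-ord(i)+1)
def pvCostA (c : Char) : Int := min ((c.toNat : Int) - 65) (90 - (c.toNat : Int) + 1)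

-- while new_name[idx - l] == 0: l += 1   (fuel-bounded; pyGet? = none is Python's IndexError,
-- unreachable for nonempty name, the port then just returns the current counter)
def pvScanL (new : List Int) (idx : Int) (k : Int) : Nat → Int
  | 0 => k
  | fuel+1 =>
    match PySem.List.pyGet? new (idx - k) with
    | some v => if v = 0 then pvScanL new idx (k+1) fuel else k
    | none => k

-- while new_name[idx + r] == 0: r += 1
def pvScanR (new : List Int) (idx : Int) (k : Int) : Nat → Int
  | 0 => k
  | fuel+1 =>
    match PySem.List.pyGet? new (idx + k) with
    | some v => if v = 0 then pvScanR new idx (k+1) fuel else k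
    | none => k

-- the while(True) loop of A; fuel n+1 always suffices (each iteration zeroes one entry)
def pvLoopA : Nat → List Int → Int → Int → Int
  | 0, _, _, ans => ans
  | fuel+1, new, idx, ans =>
    let ans := ans + (PySem.List.pyGet? new idx).getD 0
    let new := PySem.List.pySetD new idx 0
    if new.sum = 0 then ans
    else
      let l := pvScanL new idx 1 (2 * new.length + 2)
      let r := pvScanR new idx 1 (2 * new.length + 2)
      let ans := ans + (if l < r then l else r)
      let idx := if l < r then idx - l else idx + r
      pvLoopA fuel new idx ans

def solution (name : String) : Int :=
  let new := name.toList.map pvCostA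
  pvLoopA (new.length + 1) new 0 0

-- ===== PORT B =====
def pvCostB (c : Char) : Int := min ((c.toNat : Int) - 65) (90 - (c.toNat : Int) + 1)

-- while total != 0: two pointers i, j into the sorted live-position list
def pvLoopB (live costs : List Int) (n : Int) : Nat → Int → Int → Int → Int → Int → Int
  | 0, _, _, _, ans, _ => ans
  | fuel+1, i, j, pos, ans, total =>
    if total = 0 then ans
    else
      let qj := (PySem.List.pyGet? live j).getD 0
      let qi := (PySem.List.pyGet? live i).getD 0
      let ld := PySem.Int.mod (pos - qj) n
      let rd := PySem.Int.mod (qi - pos) n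
      if ld < rd then
        pvLoopB live costs n fuel i (j-1) qj (ans + ld + (PySem.List.pyGet? costs qj).getD 0)
          (total - (PySem.List.pyGet? costs qj).getD 0)
      else
        pvLoopB live costs n fuel (i+1) j qi (ans + rd + (PySem.List.pyGet? costs qi).getD 0)
          (total - (PySem.List.pyGet? costs qi).getD 0)

def solution_alt (name : String) : Int :=
  let n : Int := PySem.Str.len name
  let costs := name.toList.map pvCostB
  let live0 := (PySem.List.pyRange 0 n 1).filter
    (fun p => decide ((PySem.List.pyGet? costs p).getD 0 ≠ 0))
  let answer := if n ≠ 0 then (PySem.List.pyGet? costs 0).getD 0 else 0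
  let total := costs.sum - answer
  let live := if live0.head? = some 0 then live0.tail else live0
  pvLoopB live costs n (live.length + 1) 0 ((live.length : Int) - 1) 0 answer total

-- ===== PRECONDITION & SPEC =====
-- A raises IndexError on the empty string (new_name[0] on the empty list); excluded.
def Pre_solution (name : String) : Prop := name ≠ ""
instance (name : String) : Decidable (Pre_solution name) := by unfold Pre_solution; infer_instance
def pvWitness_solution : String := "BAZC"

-- A raises IndexError on the empty string; B returns 0 there.
def Raises_solution (name : String) : Prop := name = ""
instance (name : String) : Decidable (Raises_solution name) := by unfold Raises_solution; infer_instance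
def pvRaiseWitness_solution : String := ""
def pvRaiseWitnessOut_solution : Int := 0

def Spec_solution (name : String) (out : Int) : Prop := out = solution_alt name
instance (name : String) (out : Int) : Decidable (Spec_solution name out) := by unfold Spec_solution; infer_instance

-- ===== CLAIM (what is proved, stated in full; the proofs are below) =====
def Claim_equal_solution : Prop := ∀ (name : String), Dom_solution name → Pre_solution name → Spec_solution name (solution name)
def Claim_raises_solution : Prop := (∀ (name : String), Dom_solution name → Raises_solution name → ¬ Pre_solution name) ∧ (Dom_solution (pvRaiseWitness_solution) ∧ Raises_solution (pvRaiseWitness_solution) ∧ solution_alt (pvRaiseWitness_solution) = pvRaiseWitnessOut_solution)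

-- ===== LEMMAS AND PROOFS =====

-- value of costs at python index p (total form used throughout the proofs)
def pvGetC (costs : List Int) (p : Int) : Int := (PySem.List.pyGet? costs p).getD 0

-- python get at an in-range index, expressed at the wrapped natural position
theorem pv_get_nat (l : List Int) (i : Int) (h1 : -(l.length : Int) ≤ i) (_h2 : i < (l.length : Int)) :
    PySem.List.pyGet? l i = l[(if i < 0 then i + l.length else i).toNat]? := by
  by_cases h : i < 0
  · have hk : i = -(((-i).toNat : Nat) : Int) := by omega
    rw [if_pos h, hk, PySem.List.pyGet?_neg_natCast l (-i).toNat (by omega) (by omega)]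
    congr 1
    omega
  · rw [if_neg h, PySem.List.pyGet?_of_nonneg l (by omega)]

theorem pv_setD_neg (l : List Int) (k : Nat) (h0 : 0 < k) (h : k ≤ l.length) (v : Int) :
    PySem.List.pySetD l (-(k : Int)) v = l.set (l.length - k) v := by
  simp only [PySem.List.pySetD, PySem.List.pySet?, PySem.List.pyIdx?]
  rw [if_neg (by omega), if_pos (by omega : -(l.length : Int) ≤ -(k : Int))]
  simp

theorem pv_sum_set : ∀ (l : List Int) (k : Nat), k < l.length → (l.set k 0).sum = l.sum - l.getD k 0
  | a :: l, 0, _ => by simp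
  | a :: l, k+1, h => by
    simp only [List.set_cons_succ, List.sum_cons, List.getD_cons_succ]
    rw [pv_sum_set l k (by simpa using Nat.lt_of_succ_lt_succ h)]
    ring

theorem pv_mod_small (x n : Int) (hn : 0 < n) (h1 : -n ≤ x) (h2 : x < n) :
    PySem.Int.mod x n = if x < 0 then x + n else x := by
  rw [PySem.Int.mod_eq_emod_of_pos hn]
  by_cases h : x < 0
  · rw [if_pos h, ← Int.add_emod_right, Int.emod_eq_of_lt (by omega) (by omega)]
  · rw [if_neg h, Int.emod_eq_of_lt (by omega) (by omega)]

theorem pv_scanL_spec (new : List Int) (idx T : Int) (v : Int)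
    (hTv : PySem.List.pyGet? new (idx - T) = some v) (hv : v ≠ 0) :
    ∀ (fuel : Nat) (k : Int), 0 < k → k ≤ T →
    (∀ m : Int, k ≤ m → m < T → PySem.List.pyGet? new (idx - m) = some 0) →
    (T - k).toNat < fuel →
    pvScanL new idx k fuel = T := by
  intro fuel
  induction fuel with
  | zero => intro k _ _ _ hf; omega
  | succ fuel ih =>
    intro k hk hkT hmem hf
    by_cases hkT' : k = T
    · subst hkT'
      simp only [pvScanL, hTv]
      rw [if_neg hv]
    · have h0 := hmem k le_rfl (by omega)
      simp only [pvScanL, h0]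
      exact ih (k+1) (by omega) (by omega) (fun m hm1 hm2 => hmem m (by omega) hm2) (by omega)

theorem pv_scanR_spec (new : List Int) (idx T : Int) (v : Int)
    (hTv : PySem.List.pyGet? new (idx + T) = some v) (hv : v ≠ 0) :
    ∀ (fuel : Nat) (k : Int), 0 < k → k ≤ T →
    (∀ m : Int, k ≤ m → m < T → PySem.List.pyGet? new (idx + m) = some 0) →
    (T - k).toNat < fuel →
    pvScanR new idx k fuel = T := by
  intro fuel
  induction fuel with
  | zero => intro k _ _ _ hf; omega
  | succ fuel ih =>
    intro k hk hkT hmem hf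
    by_cases hkT' : k = T
    · subst hkT'
      simp only [pvScanR, hTv]
      rw [if_neg hv]
    · have h0 := hmem k le_rfl (by omega)
      simp only [pvScanR, h0]
      exact ih (k+1) (by omega) (by omega) (fun m hm1 hm2 => hmem m (by omega) hm2) (by omega)

theorem pv_str_ne (s : String) (h : s ≠ "") : s.toList ≠ [] := by
  intro hh
  exact h (by have := congrArg String.ofList hh; simpa using this)

-- the bisimulation: A's loop (scan-based) equals B's loop (two pointers into the sorted
-- live list), related by: d = remaining live band excluding the cursor, new = costs masked
-- to d with the pending (not yet zeroed) value w at the cursor, total = sum of new minus w.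
theorem pv_main (costs : List Int) (hn : 0 < costs.length) :
    ∀ (fuelA : Nat) (d pre post : List Int) (idx pos w ansA total : Int) (new : List Int) (fuelB : Nat),
    new.length = costs.length →
    d.Pairwise (· < ·) →
    (∀ q ∈ d, 0 ≤ q ∧ q < (costs.length : Int)) →
    (∀ q ∈ d, pvGetC costs q ≠ 0) →
    (0 ≤ idx → ∀ q ∈ d, idx < q) →
    (idx < 0 → ∀ q ∈ d, q < (costs.length : Int) + idx) →
    (-(costs.length : Int) ≤ idx) → (idx < (costs.length : Int)) →
    pos = (if idx < 0 then idx + costs.length else idx) →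
    (∀ p : Int, 0 ≤ p → p < (costs.length : Int) →
        PySem.List.pyGet? new p = some (if p ∈ d then pvGetC costs p else if p = pos then w else 0)) →
    new.sum = total + w →
    d.length < fuelA → d.length < fuelB →
    pvLoopA fuelA new idx ansA =
      pvLoopB (pre ++ d ++ post) costs (costs.length : Int) fuelB (pre.length : Int)
        ((pre.length : Int) + (d.length : Int) - 1) pos (ansA + w) total := by
  intro fuelA
  induction fuelA with
  | zero => intro d _ _ _ _ _ _ _ _ _ _ _ _ _ _ _ _ _ _ _ _ hfa _; omega
  | succ fa ih =>
    intro d pre post idx pos w ansA total new fuelB hlen hpair hrange hnz hposL hposR hidx1 hidx2 hposdef hnew hsum hfa hfb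
    match fuelB, hfb with
    | fb+1, hfb =>
    have hpos0 : 0 ≤ pos := by rw [hposdef]; split <;> omega
    have hposn : pos < (costs.length : Int) := by rw [hposdef]; split <;> omega
    have hposnd : pos ∉ d := by
      intro hmem
      by_cases h : 0 ≤ idx
      · have := hposL h pos hmem
        rw [hposdef, if_neg (by omega)] at this
        omega
      · have := hposR (by omega) pos hmem
        rw [hposdef, if_pos (by omega)] at this
        omega
    -- the value A is about to add at the cursor is exactly the pending w
    have hgetpos : PySem.List.pyGet? new pos = some w := by
      rw [hnew pos hpos0 hposn, if_neg hposnd, if_pos rfl]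
    have hgetposN : new[pos.toNat]? = some w := by
      rw [← PySem.List.pyGet?_of_nonneg new hpos0]
      exact hgetpos
    have hvget : PySem.List.pyGet? new idx = some w := by
      rw [pv_get_nat new idx (by omega) (by omega)]
      have hidxeq : (if idx < 0 then idx + (new.length : Int) else idx) = pos := by
        rw [hlen, ← hposdef]
      rw [hidxeq]
      exact hgetposN
    have hposlt : pos.toNat < new.length := by omega
    have hneweq : PySem.List.pySetD new idx 0 = new.set pos.toNat 0 := by
      by_cases h : idx < 0
      · have hk : idx = -(((-idx).toNat : Nat) : Int) := by omega
        rw [hk, pv_setD_neg new (-idx).toNat (by omega) (by omega)]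
        congr 1
        rw [hposdef, if_pos h]
        omega
      · rw [PySem.List.pySetD_of_nonneg new 0 (by omega)]
        congr 1
        rw [hposdef, if_neg h]
    have hlen' : (new.set pos.toNat 0).length = costs.length := by
      rw [List.length_set]; exact hlen
    have hsum' : (new.set pos.toNat 0).sum = total := by
      rw [pv_sum_set new pos.toNat hposlt]
      have : new.getD pos.toNat 0 = w := by
        rw [List.getD_eq_getElem?_getD, hgetposN]; rfl
      rw [this, hsum]; ring
    have hptw : ∀ p : Int, 0 ≤ p → p < (costs.length : Int) →
        PySem.List.pyGet? (new.set pos.toNat 0) p = some (if p ∈ d then pvGetC costs p else 0) := by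
      intro p hp0 hpn
      rw [PySem.List.pyGet?_of_nonneg _ hp0, List.getElem?_set]
      by_cases hpp : p = pos
      · subst hpp
        rw [if_pos rfl, if_pos (by omega), if_neg hposnd]
      · rw [if_neg (by omega), ← PySem.List.pyGet?_of_nonneg new hp0, hnew p hp0 hpn]
        by_cases hpd : p ∈ d
        · rw [if_pos hpd, if_pos hpd]
        · rw [if_neg hpd, if_neg hpd, if_neg hpp]
    -- unfold one iteration of both loops
    simp only [pvLoopA, pvLoopB, hvget, hneweq, Option.getD_some, hsum']
    by_cases htot : total = 0
    · rw [if_pos htot, if_pos htot]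
    · rw [if_neg htot, if_neg htot]
      have hdne : d ≠ [] := by
        intro hd
        subst hd
        apply htot
        rw [← hsum']
        apply List.sum_eq_zero
        intro x hx
        obtain ⟨kk, hkk, hxk⟩ := List.mem_iff_getElem.mp hx
        have := hptw (kk : Int) (by omega) (by omega)
        rw [PySem.List.pyGet?_of_nonneg _ (by omega)] at this
        simp only [List.not_mem_nil, if_false] at this
        simp only [Int.toNat_natCast] at this
        rw [List.getElem?_eq_getElem hkk, hxk] at this
        exact (Option.some_inj.mp this)
      obtain ⟨dh, dt, rfl⟩ : ∃ dh dt, d = dh :: dt := by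
        cases d with
        | nil => exact absurd rfl hdne
        | cons a l => exact ⟨a, l, rfl⟩
      obtain ⟨dl, db, hd2⟩ : ∃ L b, dh :: dt = L ++ [b] := by
        obtain ⟨L, b, h⟩ := (List.eq_nil_or_concat (dh :: dt)).resolve_left hdne
        exact ⟨L, b, by simpa [List.concat_eq_append] using h⟩
      have hlendl : (dh :: dt).length = dl.length + 1 := by rw [hd2]; simp
      have hdbmem : db ∈ dh :: dt := by rw [hd2]; simp
      have hdhmem : dh ∈ dh :: dt := by simp
      have hdbmax : ∀ q ∈ dh :: dt, q ≤ db := by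
        intro q hq
        rw [hd2] at hq hpair
        rcases List.mem_append.mp hq with h | h
        · exact le_of_lt ((List.pairwise_append.mp hpair).2.2 q h db (by simp))
        · simp at h; omega
      have hdhmin : ∀ q ∈ dt, dh < q := fun q hq => (List.pairwise_cons.mp hpair).1 q hq
      obtain ⟨hdb0, hdbn⟩ := hrange db hdbmem
      obtain ⟨hdh0, hdhn⟩ := hrange dh hdhmem
      have hdbnz := hnz db hdbmem
      have hdhnz := hnz dh hdhmem
      have hdbidx : idx < db := by
        by_cases h : 0 ≤ idx
        · exact hposL h db hdbmem
        · omega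
      have hdbtop : db < (costs.length : Int) + idx ∨ 0 ≤ idx := by
        by_cases h : idx < 0
        · exact Or.inl (hposR h db hdbmem)
        · exact Or.inr (by omega)
      have hdhidx : idx < dh := by
        by_cases h : 0 ≤ idx
        · exact hposL h dh hdhmem
        · omega
      have hdhtop : dh < (costs.length : Int) + idx ∨ 0 ≤ idx := by
        by_cases h : idx < 0
        · exact Or.inl (hposR h dh hdhmem)
        · exact Or.inr (by omega)
      -- read live[i] and live[j]
      have hqi : PySem.List.pyGet? (pre ++ (dh :: dt) ++ post) (pre.length : Int) = some dh := by
        have : pre ++ (dh :: dt) ++ post = pre ++ dh :: (dt ++ post) := by simp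
        rw [this, PySem.List.pyGet?_append_length]
      have hqj : PySem.List.pyGet? (pre ++ (dh :: dt) ++ post)
          ((pre.length : Int) + ((dh :: dt).length : Int) - 1) = some db := by
        have h1 : pre ++ (dh :: dt) ++ post = (pre ++ dl) ++ db :: post := by
          rw [hd2]; simp
        have h2 : (pre.length : Int) + ((dh :: dt).length : Int) - 1 = (((pre ++ dl).length : Nat) : Int) := by
          rw [hlendl]; push_cast [List.length_append]; ring
        rw [h1, h2, PySem.List.pyGet?_append_length]
      set n : Int := (costs.length : Int) with hndef
      set TL : Int := idx + n - db with hTLdef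
      set TR : Int := dh - idx with hTRdef
      have hTL1 : 0 < TL := by rcases hdbtop with h | h <;> omega
      have hTL2 : TL < n := by omega
      have hTR1 : 0 < TR := by omega
      have hTR2 : TR < n := by rcases hdhtop with h | h <;> omega
      -- scan results
      have hscanL : pvScanL (new.set pos.toNat 0) idx 1 (2 * (new.set pos.toNat 0).length + 2) = TL := by
        apply pv_scanL_spec _ _ _ (pvGetC costs db)
        · have : idx - TL = db - n := by omega
          rw [this, pv_get_nat _ _ (by rw [hlen']; omega) (by rw [hlen']; omega),
              if_pos (by omega)]
          have hix : ((db - n) + ((new.set pos.toNat 0).length : Int)).toNat = db.toNat := by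
            rw [hlen']; omega
          rw [hix, ← PySem.List.pyGet?_of_nonneg _ hdb0, hptw db hdb0 hdbn, if_pos hdbmem]
        · exact hdbnz
        · omega
        · omega
        · intro m hm1 hm2
          set x : Int := idx - m with hxdef
          have hxlo : db - n < x := by omega
          have hxhi : x ≤ idx - 1 := by omega
          by_cases hx0 : 0 ≤ x
          · have hidx0 : 0 ≤ idx := by omega
            rw [hptw x hx0 (by omega), if_neg ?_]
            intro hxd
            have := hposL hidx0 x hxd
            omega
          · rw [pv_get_nat _ _ (by rw [hlen']; omega) (by rw [hlen']; omega), if_pos (by omega)]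
            set p : Int := x + n with hpdef
            have hp0 : 0 ≤ p := by omega
            have hix : (x + ((new.set pos.toNat 0).length : Int)).toNat = p.toNat := by
              rw [hlen']
            rw [hix, ← PySem.List.pyGet?_of_nonneg _ hp0, hptw p hp0 (by omega), if_neg ?_]
            intro hpd
            have := hdbmax p hpd
            omega
        · omega
      have hscanR : pvScanR (new.set pos.toNat 0) idx 1 (2 * (new.set pos.toNat 0).length + 2) = TR := by
        apply pv_scanR_spec _ _ _ (pvGetC costs dh)
        · have : idx + TR = dh := by omega
          rw [this, hptw dh hdh0 hdhn, if_pos hdhmem]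
        · exact hdhnz
        · omega
        · omega
        · intro m hm1 hm2
          set x : Int := idx + m with hxdef
          have hxlo : idx + 1 ≤ x := by omega
          have hxhi : x < dh := by omega
          by_cases hx0 : 0 ≤ x
          · rw [hptw x hx0 (by omega), if_neg ?_]
            intro hxd
            rcases List.mem_cons.mp hxd with h | h
            · omega
            · have := hdhmin x h; omega
          · have hidxneg : idx < 0 := by omega
            rw [pv_get_nat _ _ (by rw [hlen']; omega) (by rw [hlen']; omega), if_pos (by omega)]
            set p : Int := x + n with hpdef
            have hp0 : 0 ≤ p := by omega
            have hix : (x + ((new.set pos.toNat 0).length : Int)).toNat = p.toNat := by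
              rw [hlen']
            rw [hix, ← PySem.List.pyGet?_of_nonneg _ hp0, hptw p hp0 (by omega), if_neg ?_]
            intro hpd
            have h1 := hposR hidxneg p hpd
            omega
        · omega
      -- the two distances agree
      have hld : PySem.Int.mod (pos - db) n = TL := by
        rw [pv_mod_small _ _ (by omega) (by omega) (by omega)]
        rw [hposdef]
        by_cases h : idx < 0
        · rw [if_pos h, if_neg (by rcases hdbtop with hh | hh <;> omega)]
          try omega
        · rw [if_neg h, if_pos (by omega)]
          try omega
      have hrd : PySem.Int.mod (dh - pos) n = TR := by
        rw [pv_mod_small _ _ (by omega) (by omega) (by omega)]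
        rw [hposdef]
        by_cases h : idx < 0
        · rw [if_pos h, if_pos (by rcases hdhtop with hh | hh <;> omega)]
          try omega
        · rw [if_neg h, if_neg (by omega)]
          try omega
      rw [hqi, hqj, hscanL, hscanR]
      simp only [Option.getD_some, hld, hrd]
      by_cases hbr : TL < TR
      · -- move left: the cursor jumps to the band maximum db (negative python index db - n)
        rw [if_pos hbr, if_pos hbr, if_pos hbr]
        have hidx' : idx - TL = db - n := by omega
        rw [hidx']
        have hgetdb : (PySem.List.pyGet? costs db).getD 0 = pvGetC costs db := rfl
        have hstep := ih dl pre (db :: post) (db - n) db (pvGetC costs db)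
          (ansA + w + TL) (total - pvGetC costs db) (new.set pos.toNat 0) fb
          hlen'
          (by rw [hd2] at hpair; exact (List.pairwise_append.mp hpair).1)
          (fun q hq => hrange q (by rw [hd2]; exact List.mem_append_left _ hq))
          (fun q hq => hnz q (by rw [hd2]; exact List.mem_append_left _ hq))
          (by intro h; omega)
          (by
            intro _ q hq
            have : q < db := by
              rw [hd2] at hpair
              exact (List.pairwise_append.mp hpair).2.2 q hq db (by simp)
            omega)
          (by omega) (by omega)
          (by rw [if_pos (by omega)]; omega)
          (by
            intro p hp0 hpn
            rw [hptw p hp0 hpn]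
            by_cases hpd : p ∈ dl
            · rw [if_pos (by rw [hd2]; exact List.mem_append_left _ hpd), if_pos hpd]
            · by_cases hpb : p = db
              · subst hpb
                rw [if_pos hdbmem, if_neg hpd, if_pos rfl]
              · rw [if_neg ?_, if_neg hpd, if_neg hpb]
                rw [hd2]
                simp only [List.mem_append, List.mem_singleton]
                rintro (h | h)
                · exact hpd h
                · exact hpb h)
          (by rw [hsum']; ring)
          (by omega) (by omega)
        rw [hstep]
        have hlist : pre ++ dl ++ db :: post = pre ++ (dh :: dt) ++ post := by
          rw [hd2]; simp
        rw [hlist]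
        have hj' : (pre.length : Int) + (dl.length : Int) - 1
            = (pre.length : Int) + ((dh :: dt).length : Int) - 1 - 1 := by
          rw [hlendl]; push_cast; ring
        rw [hj']
        rfl
      · -- move right: the cursor jumps to the band minimum dh
        rw [if_neg hbr, if_neg hbr, if_neg hbr]
        have hlendt : (dh :: dt).length = dt.length + 1 := by simp
        have hidx' : idx + TR = dh := by omega
        rw [hidx']
        have hstep := ih dt (pre ++ [dh]) post dh dh (pvGetC costs dh)
          (ansA + w + TR) (total - pvGetC costs dh) (new.set pos.toNat 0) fb
          hlen'
          (List.pairwise_cons.mp hpair).2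
          (fun q hq => hrange q (List.mem_cons_of_mem _ hq))
          (fun q hq => hnz q (List.mem_cons_of_mem _ hq))
          (fun _ q hq => hdhmin q hq)
          (by intro h; omega)
          (by omega) (by omega)
          (by rw [if_neg (by omega)])
          (by
            intro p hp0 hpn
            rw [hptw p hp0 hpn]
            by_cases hpd : p ∈ dt
            · rw [if_pos (List.mem_cons_of_mem _ hpd), if_pos hpd]
            · by_cases hpb : p = dh
              · subst hpb
                rw [if_pos hdhmem, if_neg hpd, if_pos rfl]
              · rw [if_neg ?_, if_neg hpd, if_neg hpb]
                simp only [List.mem_cons]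
                rintro (h | h)
                · exact hpb h
                · exact hpd h)
          (by rw [hsum']; ring)
          (by omega) (by omega)
        rw [hstep]
        have hlist : (pre ++ [dh]) ++ dt ++ post = pre ++ (dh :: dt) ++ post := by simp
        rw [hlist]
        have hi' : ((pre ++ [dh]).length : Int) = (pre.length : Int) + 1 := by
          simp
        have hj' : ((pre ++ [dh]).length : Int) + (dt.length : Int) - 1
            = (pre.length : Int) + ((dh :: dt).length : Int) - 1 := by
          simp [hlendt]; ring
        rw [hj', hi']
        rfl



-- ===== VERDICT (by name: the statement is the Claim_ definition above) =====
theorem solution_spec : Claim_equal_solution := by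
  intro name _ hpre
  unfold Spec_solution
  have hcost : pvCostB = pvCostA := rfl
  set cs : List Int := name.toList.map pvCostA with hcs
  have hlenname : cs.length = name.toList.length := by simp [hcs]
  have hn : 0 < cs.length := by
    have h := pv_str_ne name hpre
    cases hh : name.toList with
    | nil => exact absurd hh h
    | cons a l => rw [hlenname, hh]; simp
  have hstr : PySem.Str.len name = (cs.length : Int) := by rw [PySem.Str.len_eq, hlenname]
  set live0 : List Int := (PySem.List.pyRange 0 (cs.length : Int) 1).filter
      (fun p => decide ((PySem.List.pyGet? cs p).getD 0 ≠ 0)) with hlive0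
  set d0 : List Int := if live0.head? = some 0 then live0.tail else live0 with hd0
  have hrhs : solution_alt name = pvLoopB d0 cs (cs.length : Int) (d0.length + 1) 0
      ((d0.length : Int) - 1) 0 ((PySem.List.pyGet? cs 0).getD 0) (cs.sum - (PySem.List.pyGet? cs 0).getD 0) := by
    simp only [solution_alt, hcost, hstr, ← hcs, ← hlive0, ← hd0,
      if_pos (by omega : (cs.length : Int) ≠ 0)]
  rw [hrhs]
  -- facts about live0 and d0
  have hl0p : live0.Pairwise (· < ·) :=
    List.Pairwise.filter _ (PySem.List.pairwise_lt_pyRange_one 0 (cs.length : Int))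
  have hl0mem : ∀ q ∈ live0, (0 ≤ q ∧ q < (cs.length : Int)) ∧ pvGetC cs q ≠ 0 := by
    intro q hq
    obtain ⟨h1, h2⟩ := List.mem_filter.mp hq
    exact ⟨PySem.List.mem_pyRange_one.mp h1, by simpa [pvGetC] using h2⟩
  have hd0sub : ∀ q ∈ d0, q ∈ live0 := by
    intro q hq
    rw [hd0] at hq
    split at hq
    · exact List.mem_of_mem_tail hq
    · exact hq
  have hd0p : d0.Pairwise (· < ·) := by
    rw [hd0]
    split
    · exact hl0p.tail
    · exact hl0p
  have hd0pos : ∀ q ∈ d0, 0 < q := by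
    intro q hq
    have hq0 := (hl0mem q (hd0sub q hq)).1.1
    rcases eq_or_lt_of_le hq0 with h0 | h0
    · exfalso
      rw [hd0] at hq
      by_cases hh : live0.head? = some 0
      · rw [if_pos hh] at hq
        cases hl : live0 with
        | nil => rw [hl] at hq; simp at hq
        | cons x t =>
          rw [hl] at hq hh hl0p
          simp at hh hq
          have := (List.pairwise_cons.mp hl0p).1 q hq
          omega
      · rw [if_neg hh] at hq
        cases hl : live0 with
        | nil => rw [hl] at hq; simp at hq
        | cons x t =>
          rw [hl] at hq hh
          rcases List.mem_cons.mp hq with h | h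
          · exact hh (by simp [← h, ← h0])
          · rw [hl] at hl0p hl0mem
            have h1 := (List.pairwise_cons.mp hl0p).1 q h
            have h2 := (hl0mem x (by simp)).1.1
            omega
    · exact h0
  have hnotlive : ∀ p : Int, 0 ≤ p → p < (cs.length : Int) → p ∉ live0 → pvGetC cs p = 0 := by
    intro p h1 h2 hp
    by_contra hne
    exact hp (List.mem_filter.mpr ⟨PySem.List.mem_pyRange_one.mpr ⟨h1, h2⟩, by simpa [pvGetC] using hne⟩)
  have hnotd0 : ∀ p : Int, p ∉ d0 → p ≠ 0 → p ∉ live0 := by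
    intro p hp hp0 hpl
    apply hp
    rw [hd0]
    by_cases hh : live0.head? = some 0
    · rw [if_pos hh]
      cases hl : live0 with
      | nil => rw [hl] at hpl; simp at hpl
      | cons x t =>
        rw [hl] at hpl hh
        simp at hh
        rcases List.mem_cons.mp hpl with h | h
        · exact absurd (h.trans hh) hp0
        · exact h
    · rw [if_neg hh]
      exact hpl
  have key := pv_main cs hn (cs.length + 1) d0 [] [] 0 0 (pvGetC cs 0) 0
    (cs.sum - pvGetC cs 0) cs (d0.length + 1)
    rfl
    hd0p
    (fun q hq => (hl0mem q (hd0sub q hq)).1)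
    (fun q hq => (hl0mem q (hd0sub q hq)).2)
    (fun _ q hq => hd0pos q hq)
    (by intro h; omega)
    (by omega) (by exact_mod_cast hn)
    (by norm_num)
    (by
      intro p hp0 hpn
      rw [PySem.List.pyGet?_of_nonneg cs hp0,
        List.getElem?_eq_getElem (by omega : p.toNat < cs.length)]
      have hval : pvGetC cs p = cs[p.toNat] := by
        rw [pvGetC, PySem.List.pyGet?_of_nonneg cs hp0,
          List.getElem?_eq_getElem (by omega : p.toNat < cs.length)]
        rfl
      by_cases hpd : p ∈ d0
      · rw [if_pos hpd, hval]
      · rw [if_neg hpd]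
        by_cases hp00 : p = 0
        · subst hp00
          rw [if_pos rfl, hval]
        · rw [if_neg hp00, ← hval]
          exact congrArg some (hnotlive p hp0 hpn (hnotd0 p hpd hp00))
      )
    (by ring)
    (by
      have h1 : d0.length ≤ live0.length := by
        rw [hd0]; split
        · exact live0.length_tail.le.trans (by omega)
        · exact le_rfl
      have h2 : live0.length ≤ cs.length := by
        rw [hlive0]
        refine (List.length_filter_le _ _).trans ?_
        rw [PySem.List.length_pyRange_one]
        omega
      omega)
    (by omega)
  have hlhs : solution name = pvLoopA (cs.length + 1) cs 0 0 := rfl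
  rw [hlhs, key]
  have hg : pvGetC cs 0 = (PySem.List.pyGet? cs 0).getD 0 := rfl
  simp only [List.nil_append, List.append_nil, List.length_nil, Nat.cast_zero, zero_add, hg]

@[simp] theorem solution_raises : Claim_raises_solution := by
  unfold Claim_raises_solution
  exact ⟨fun name _ h => by simp [Raises_solution] at h; simp [Pre_solution, h], by decide⟩
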